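-- pv_equiv track=rewrite | github.com/Zakeiswo/TeaSys_Dev | main/tools.py | actionrewriter
-- ===== SOURCE A (Python) =====
-- def actionrewriter(list_t):
--     cheek_seq =["", "", ""]  # the initial is 3 none
--     list_n = []  # the new list
--     for item in list_t:
--         if item :
--             cheek_seq.append(item)
--             # cheek it with 4 elements in it
--             if "" in cheek_seq:
--                 cheek_seq.pop(0)
--                 continue  # jump to the next step
--             else:
--                 # choose the most one
--                 counter_seq = 0
--                 act_t =""  # if the counter is the same the first one will be outputed
--                 for x in cheek_seq:  # count each action in the seq
--                     counter_t = cheek_seq.count(x)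
--                     if counter_t > counter_seq:
--                         act_t = x
--                         counter_seq = counter_t
--                 list_n.append(act_t)  # add the most one or the first one with the same counter
--             # pop the fist one
--             cheek_seq.pop(0)
--     return  list_n
-- ===== SOURCE B (Python) =====
-- def actionrewriter(list_t):
--     filtered = [x for x in list_t if x]
--     result = []
--     for i in range(len(filtered) - 3):
--         window = filtered[i:i + 4]
--         best_count = 0
--         best = ""
--         for x in window:
--             c = window.count(x)
--             if c > best_count:
--                 best = x
--                 best_count = c
--         result.append(best)
--     return result
-- ===== Notes on version B (the rewrite author's own statement) =====
-- stated objective: simpler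
-- what changed: Replaces A's fused loop with its mutated 3-slot buffer, '' sentinels and pop(0)/continue control flow by a plain filter pass followed by an index-based pass over the fixed-size windows of the filtered list.
import Mathlib
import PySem

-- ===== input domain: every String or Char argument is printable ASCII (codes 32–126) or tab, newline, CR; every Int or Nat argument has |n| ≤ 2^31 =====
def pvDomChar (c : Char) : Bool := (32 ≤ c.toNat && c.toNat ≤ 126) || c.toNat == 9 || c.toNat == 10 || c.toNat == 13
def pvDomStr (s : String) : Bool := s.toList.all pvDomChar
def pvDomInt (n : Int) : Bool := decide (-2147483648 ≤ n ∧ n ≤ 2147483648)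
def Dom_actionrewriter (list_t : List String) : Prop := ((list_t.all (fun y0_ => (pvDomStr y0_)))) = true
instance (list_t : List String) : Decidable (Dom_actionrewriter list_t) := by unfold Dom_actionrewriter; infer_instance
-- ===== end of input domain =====

-- B is the same computation written as a filter pass followed by an index-based pass over
-- the 4-windows of the filtered list, instead of A's fused loop with a mutated sentinel buffer.

-- Shared inner loop of both Pythons: first element of the window whose count strictly
-- exceeds the running maximum (state = (counter_seq, act_t), initial (0, "")).
def pickMode (window : List String) : String :=
  (window.foldl
    (fun (st : Nat × String) x =>
      let counter_t := PySem.List.count window x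
      if counter_t > st.1 then (counter_t, x) else st)
    (0, "")).2

-- ===== PORT A =====
-- state = (cheek_seq, list_n); append, sentinel test ('"" in cheek_seq'), pop(0) as drop 1
def actionrewriterStep (st : List String × List String) (item : String) : List String × List String :=
  if item ≠ "" then
    let cheek := st.1 ++ [item]
    if "" ∈ cheek then
      (cheek.drop 1, st.2)              -- pop(0); continue
    else
      (cheek.drop 1, st.2 ++ [pickMode cheek])
  else st

def actionrewriter (list_t : List String) : List String :=
  (list_t.foldl actionrewriterStep (["", "", ""], [])).2

-- ===== PORT B =====
def actionrewriter_alt (list_t : List String) : List String :=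
  let filtered := list_t.filter (fun x => x ≠ "")
  (PySem.List.pyRange 0 ((filtered.length : Int) - 3) 1).map
    (fun i => pickMode (PySem.List.slice filtered (some i) (some (i + 4))))

-- ===== PRECONDITION & SPEC =====
def Spec_actionrewriter (list_t : List String) (out : List String) : Prop := out = actionrewriter_alt list_t
instance (list_t : List String) (out : List String) : Decidable (Spec_actionrewriter list_t out) := by unfold Spec_actionrewriter; infer_instance

-- ===== CLAIM (what is proved, stated in full; the proofs are below) =====
def Claim_equal_actionrewriter : Prop := ∀ (list_t : List String), Dom_actionrewriter list_t → Spec_actionrewriter list_t (actionrewriter list_t)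

-- ===== LEMMAS AND PROOFS =====

-- the 4-windows of a list, head first
def win4 : List String → List (List String)
  | a :: b :: c :: d :: t => [a, b, c, d] :: win4 (b :: c :: d :: t)
  | _ => []

theorem win4_eq_range (f : List String) :
    (List.range (f.length - 3)).map (fun i => (f.drop i).take 4) = win4 f := by
  induction f with
  | nil => simp [win4]
  | cons a t ih =>
    match t with
    | [] => simp [win4]
    | [b] => simp [win4]
    | [b, c] => simp [win4]
    | b :: c :: d :: t' =>
      have hlen : (a :: b :: c :: d :: t').length - 3 = t'.length + 1 := by
        simp
      rw [hlen, List.range_succ_eq_map, List.map_cons, List.map_map, win4]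
      congr 1

theorem foldA_nopad (f : List String) (p q r : String) (acc : List String)
    (hf : ∀ x ∈ f, x ≠ "") (hp : p ≠ "") (hq : q ≠ "") (hr : r ≠ "") :
    (f.foldl actionrewriterStep ([p, q, r], acc)).2 = acc ++ (win4 (p :: q :: r :: f)).map pickMode := by
  induction f generalizing p q r acc with
  | nil => simp [win4]
  | cons x t ih =>
    have hx : x ≠ "" := hf x (by simp)
    have hcont : ("" ∉ [p, q, r, x]) := by
      intro h
      simp only [List.mem_cons, List.not_mem_nil, or_false] at h
      rcases h with h | h | h | h
      exacts [hp h.symm, hq h.symm, hr h.symm, hx h.symm]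
    have hstep : actionrewriterStep ([p, q, r], acc) x
        = ([q, r, x], acc ++ [pickMode [p, q, r, x]]) := by
      show (if x ≠ "" then _ else _) = _
      rw [if_pos hx]
      show (if "" ∈ [p, q, r, x] then _ else _) = _
      rw [if_neg hcont]
      rfl
    rw [List.foldl_cons, hstep, ih q r x _ (fun y hy => hf y (by simp [hy])) hq hr hx]
    rw [win4]
    simp

theorem foldA_eq (f : List String) (hf : ∀ x ∈ f, x ≠ "") :
    (f.foldl actionrewriterStep (["", "", ""], [])).2 = (win4 f).map pickMode := by
  match f with
  | [] => simp [win4]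
  | [a] =>
    have ha : a ≠ "" := hf a (by simp)
    simp [actionrewriterStep, ha, win4]
  | [a, b] =>
    have ha : a ≠ "" := hf a (by simp)
    have hb : b ≠ "" := hf b (by simp)
    simp [actionrewriterStep, ha, hb, win4]
  | a :: b :: c :: t =>
    have ha : a ≠ "" := hf a (by simp)
    have hb : b ≠ "" := hf b (by simp)
    have hc : c ≠ "" := hf c (by simp)
    have h3 : (a :: b :: c :: t).foldl actionrewriterStep (["", "", ""], [])
        = t.foldl actionrewriterStep ([a, b, c], []) := by
      simp [List.foldl_cons, actionrewriterStep, ha, hb, hc]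
    rw [h3, foldA_nopad t a b c [] (fun y hy => hf y (by simp [hy])) ha hb hc]
    simp

theorem alt_unfold (l : List String) :
    actionrewriter_alt l
      = (PySem.List.pyRange 0 (((l.filter (fun x => x ≠ "")).length : Int) - 3) 1).map
          (fun i => pickMode (PySem.List.slice (l.filter (fun x => x ≠ "")) (some i) (some (i + 4)))) := rfl

theorem actionrewriter_spec : Claim_equal_actionrewriter := by
  intro list_t _
  unfold Spec_actionrewriter actionrewriter
  rw [alt_unfold]
  set f := list_t.filter (fun x => x ≠ "") with hfdef
  have hfold : list_t.foldl actionrewriterStep (["", "", ""], [])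
      = f.foldl actionrewriterStep (["", "", ""], []) := by
    rw [hfdef, List.foldl_filter]
    congr 1
    funext st x
    by_cases hx : x = "" <;> simp [actionrewriterStep, hx]
  have hmem : ∀ x ∈ f, x ≠ "" := by
    intro x hx
    have := List.of_mem_filter hx
    simpa using this
  rw [hfold, foldA_eq f hmem]
  have hrange : PySem.List.pyRange 0 ((f.length : Int) - 3) 1
      = (List.range (f.length - 3)).map (fun k : Nat => (k : Int)) := by
    rw [PySem.List.pyRange_one]
    have : ((f.length : Int) - 3 - 0).toNat = f.length - 3 := by omega
    rw [this]
    simp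
  rw [hrange, List.map_map]
  have hslice : ∀ k : Nat, PySem.List.slice f (some ((k : Int))) (some ((k : Int) + 4))
      = (f.drop k).take 4 := by
    intro k
    have : ((k : Int) + 4) = ((k + 4 : Nat) : Int) := by push_cast; ring
    rw [this, PySem.List.slice_natCast]
    congr 1
    omega
  have hfun : ((fun i => pickMode (PySem.List.slice f (some i) (some (i + 4)))) ∘ (fun k : Nat => (k : Int)))
      = (fun k : Nat => pickMode ((f.drop k).take 4)) := by
    funext k
    simp only [Function.comp_apply, hslice k]
  rw [hfun, ← win4_eq_range f, List.map_map]
  rfl
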